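-- pv_equiv track=rewrite | github.com/PaddlePaddle/Knover | projects/AG-DST/utils.py | parse_ds
-- ===== SOURCE A (Python) =====
-- from collections import defaultdict
--
-- def parse_ds(ds_seq, schema, remove_nm=True, convert_specials=True):
--     """
--     Parse dialogue state from sequence to dict.
--
--     Args:
--         ds_seq(str): The sequence of dialogue state.
--         schema(dict): Domains and slots of the current dataset.
--         remove_nm(bool): If true, remove the `<nm>` slot value.
--         convert_specials(bool): If true, convert special tokens `<nm>` and `<dc>` to `not mentioned` and `dontcare`.
--
--     Returns:
--         ds_dict(defaultdict(dict)): The DS dict after parsing.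
--     """
--     ds_dict = defaultdict(lambda: defaultdict(lambda: defaultdict(dict)))
--     ds_seq = ds_seq.strip().split()
--     cur_dom, cur_slot_type, cur_slot, cur_val = "", "", "", []
--     for token in ds_seq:
--         if token in ("<ds/>", "</ds>"):
--             continue
--         if token[0] == "<" and token[-1] == ">":
--             if token.count("-") == 2:
--                 # dom-slot_type-slot special token
--                 # Save previous slot and values
--                 if cur_dom and cur_slot_type and cur_slot and cur_val:
--                     ds_dict[cur_dom][cur_slot_type][cur_slot] = " ".join(cur_val)
--                 cur_dom, cur_slot_type, cur_slot = token[1:-1].split("-")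
--                 cur_val = []
--             elif token in ("<nm>", "<dc>"):
--                 cur_val.append(token)
--         else:
--             cur_val.append(token)
--
--     if all([cur_dom, cur_slot_type, cur_slot, cur_val]):
--         ds_dict[cur_dom][cur_slot_type][cur_slot] = " ".join(cur_val)
--
--     out_ds_dict = defaultdict(lambda: defaultdict(lambda: defaultdict(dict)))
--     for dom in ds_dict:
--         for slot_type in ds_dict[dom]:
--             for slot, slot_val in ds_dict[dom][slot_type].items():
--                 if remove_nm and slot_val == "<nm>":
--                     continue
--                 if convert_specials:
--                     if slot_val == "<nm>":
--                         slot_val = "not mentioned"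
--                     elif slot_val == "<dc>":
--                         slot_val = "dontcare"
--                 out_ds_dict[dom][slot_type][slot] = [slot_val]
--
--     return out_ds_dict
-- ===== SOURCE B (Python) =====
-- def parse_ds(ds_seq, schema, remove_nm=True, convert_specials=True):
--     """Parse dialogue state sequence into a nested dict (pipeline version)."""
--     def keep(tok):
--         if tok in ("<ds/>", "</ds>"):
--             return False
--         if tok[0] == "<" and tok[-1] == ">":
--             return tok.count("-") == 2 or tok in ("<nm>", "<dc>")
--         return True
--
--     def is_header(tok):
--         return tok[0] == "<" and tok[-1] == ">" and tok.count("-") == 2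
--
--     toks = [t for t in ds_seq.split() if keep(t)]
--
--     # split the token stream into (header, value-token) segments
--     segments = []
--     for t in toks:
--         if is_header(t):
--             segments.append((tuple(t[1:-1].split("-")), []))
--         elif segments:
--             segments[-1][1].append(t)
--
--     # nested raw dict; a later segment for the same slot overwrites the earlier one
--     raw = {}
--     for (dom, slot_type, slot), vals in segments:
--         if dom and slot_type and slot and vals:
--             raw.setdefault(dom, {}).setdefault(slot_type, {})[slot] = " ".join(vals)
--
--     special = {"<nm>": "not mentioned", "<dc>": "dontcare"}
--
--     def fix(v):
--         return special.get(v, v) if convert_specials else v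
--
--     def prune(sdict):
--         return {s: [fix(v)] for s, v in sdict.items() if not (remove_nm and v == "<nm>")}
--
--     return {d: td2 for d, td in raw.items()
--             if (td2 := {t: sd2 for t, sd in td.items() if (sd2 := prune(sd))})}
-- ===== Notes on version B (the rewrite author's own statement) =====
-- stated objective: alternative
-- what changed: Replaces A's single stateful scan with flush-on-header plus a defaultdict re-walk by a declarative pipeline: filter tokens, split the stream into (header, values) segments, fold the segments into a plain nested dict with setdefault, and produce the output via nested comprehensions that convert values and drop emptied levels instead of imperative defaultdict writes.
import Mathlib
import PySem

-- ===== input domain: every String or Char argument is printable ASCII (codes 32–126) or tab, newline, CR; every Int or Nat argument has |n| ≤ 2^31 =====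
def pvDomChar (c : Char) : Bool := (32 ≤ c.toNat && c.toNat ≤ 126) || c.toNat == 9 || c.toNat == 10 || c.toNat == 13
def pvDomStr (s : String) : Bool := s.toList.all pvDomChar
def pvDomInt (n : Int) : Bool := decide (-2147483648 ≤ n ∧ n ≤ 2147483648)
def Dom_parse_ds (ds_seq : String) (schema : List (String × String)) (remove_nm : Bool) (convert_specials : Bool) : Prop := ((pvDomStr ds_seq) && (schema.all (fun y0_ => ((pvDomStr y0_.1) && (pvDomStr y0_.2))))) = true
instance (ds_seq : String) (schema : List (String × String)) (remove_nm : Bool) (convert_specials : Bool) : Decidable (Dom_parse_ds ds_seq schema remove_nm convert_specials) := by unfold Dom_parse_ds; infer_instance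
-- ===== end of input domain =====

-- ===== PORT A =====
-- B rewrites A's stateful scan + defaultdict re-walk as a filter/segment/fold/comprehension pipeline (alternative decomposition, same cost).

-- nested dict types (dict -> insertion-ordered assoc dict)
abbrev pvSD := PySem.Dict String String
abbrev pvTD := PySem.Dict String pvSD
abbrev pvND := PySem.Dict String pvTD
abbrev pvSDo := PySem.Dict String (List String)
abbrev pvTDo := PySem.Dict String pvSDo
abbrev pvNDo := PySem.Dict String pvTDo

-- token[0] == "<" and token[-1] == ">"
def aIsBracket (t : String) : Bool :=
  (PySem.Str.pyGet? t 0 == some '<') && (PySem.Str.pyGet? t (-1) == some '>')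

-- token[1:-1].split("-") unpacked into three parts (a bracketed token with exactly
-- two '-' always splits into exactly three parts, so the default is unreachable)
def aHeaderTriple (t : String) : String × String × String :=
  match PySem.Str.split? (PySem.Str.slice t (some 1) (some (-1))) "-" with
  | some [d, st, s] => (d, st, s)
  | _ => ("", "", "")

-- ds_dict[dom][slot_type][slot] = v  on the defaultdict
def aSetNested (m : pvND) (d t s v : String) : pvND :=
  m.insert d ((m.getD d .empty).insert t (((m.getD d .empty).getD t .empty).insert s v))

-- out_ds_dict[dom][slot_type][slot] = v  on the output defaultdict
def aSetO (o : pvNDo) (d t s : String) (v : List String) : pvNDo :=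
  o.insert d ((o.getD d .empty).insert t (((o.getD d .empty).getD t .empty).insert s v))

-- one iteration of A's token loop; state = (ds_dict, (cur_dom, cur_slot_type, cur_slot), cur_val)
def aStep (st : pvND × (String × String × String) × List String) (token : String) :
    pvND × (String × String × String) × List String :=
  let (m, cur, vals) := st
  if token == "<ds/>" || token == "</ds>" then st
  else if aIsBracket token then
    if PySem.Str.count token "-" == 2 then
      let m' := if (cur.1 != "") && (cur.2.1 != "") && (cur.2.2 != "") && !vals.isEmpty then
                  aSetNested m cur.1 cur.2.1 cur.2.2 (PySem.Str.join " " vals)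
                else m
      (m', aHeaderTriple token, [])
    else if token == "<nm>" || token == "<dc>" then (m, cur, vals ++ [token])
    else st
  else (m, cur, vals ++ [token])

-- the conversion of special tokens in A's second loop
def aConv (convert_specials : Bool) (v : String) : String :=
  if convert_specials then
    if v == "<nm>" then "not mentioned" else if v == "<dc>" then "dontcare" else v
  else v

-- A's second (transforming) triple loop
def aTransform (remove_nm convert_specials : Bool) (m : pvND) : pvNDo :=
  m.keys.foldl (fun o dom =>
    (m.getD dom .empty).keys.foldl (fun o slot_type =>
      ((m.getD dom .empty).getD slot_type .empty).items.foldl (fun o sv =>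
        if remove_nm && sv.2 == "<nm>" then o
        else aSetO o dom slot_type sv.1 [aConv convert_specials sv.2]) o) o) .empty

def parse_ds (ds_seq : String) (schema : List (String × String)) (remove_nm : Bool) (convert_specials : Bool) : List (String × List (String × List (String × List String))) :=
  let st := (PySem.Str.split₀ (PySem.Str.strip ds_seq)).foldl aStep (.empty, ("", "", ""), [])
  let (m, cur, vals) := st
  let m := if (cur.1 != "") && (cur.2.1 != "") && (cur.2.2 != "") && !vals.isEmpty then
             aSetNested m cur.1 cur.2.1 cur.2.2 (PySem.Str.join " " vals)
           else m
  ((aTransform remove_nm convert_specials m).items.map (fun p =>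
    (p.1, p.2.items.map (fun q => (q.1, q.2.items)))))

-- ===== PORT B =====
def bKeep (t : String) : Bool :=
  if t == "<ds/>" || t == "</ds>" then false
  else if (PySem.Str.pyGet? t 0 == some '<') && (PySem.Str.pyGet? t (-1) == some '>') then
    (PySem.Str.count t "-" == 2) || t == "<nm>" || t == "<dc>"
  else true

def bIsHeader (t : String) : Bool :=
  (PySem.Str.pyGet? t 0 == some '<') && (PySem.Str.pyGet? t (-1) == some '>')
    && (PySem.Str.count t "-" == 2)

-- tuple(t[1:-1].split("-")) (always three parts for a header token; default unreachable)
def bHeader (t : String) : String × String × String :=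
  match PySem.Str.split? (PySem.Str.slice t (some 1) (some (-1))) "-" with
  | some [d, st, s] => (d, st, s)
  | _ => ("", "", "")

-- one step of B's segment-splitting loop
def bSegStep (segs : List ((String × String × String) × List String)) (t : String) :
    List ((String × String × String) × List String) :=
  if bIsHeader t then segs ++ [(bHeader t, [])]
  else
    match segs.getLast? with
    | none => segs
    | some (h, vs) => segs.dropLast ++ [(h, vs ++ [t])]

-- raw.setdefault(dom, {}).setdefault(slot_type, {})[slot] = v
def bSetRaw (m : pvND) (d t s v : String) : pvND :=
  let m1 := m.setdefault d .empty
  let td := m1.getD d .empty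
  let td1 := td.setdefault t .empty
  let sd := td1.getD t .empty
  m1.insert d (td1.insert t (sd.insert s v))

-- one step of B's raw-building loop over the segments
def bRawStep (m : pvND) (seg : (String × String × String) × List String) : pvND :=
  if (seg.1.1 != "") && (seg.1.2.1 != "") && (seg.1.2.2 != "") && !seg.2.isEmpty then
    bSetRaw m seg.1.1 seg.1.2.1 seg.1.2.2 (PySem.Str.join " " seg.2)
  else m

-- special.get(v, v) if convert_specials else v
def bFix (convert_specials : Bool) (v : String) : String :=
  if convert_specials then
    (PySem.Dict.ofList [("<nm>", "not mentioned"), ("<dc>", "dontcare")]).getD v v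
  else v

-- {s: [fix(v)] for s, v in sdict.items() if not (remove_nm and v == "<nm>")}
def bPrune (remove_nm convert_specials : Bool) (sd : pvSD) : List (String × List String) :=
  (sd.items.filter (fun sv => !(remove_nm && sv.2 == "<nm>"))).map
    (fun sv => (sv.1, [bFix convert_specials sv.2]))

def parse_ds_alt (ds_seq : String) (schema : List (String × String)) (remove_nm : Bool) (convert_specials : Bool) : List (String × List (String × List (String × List String))) :=
  let toks := (PySem.Str.split₀ ds_seq).filter bKeep
  let segs := toks.foldl bSegStep []
  let raw : pvND := segs.foldl bRawStep .empty
  raw.items.filterMap (fun p =>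
    let td2 := p.2.items.filterMap (fun q =>
      let sd2 := bPrune remove_nm convert_specials q.2
      if sd2.isEmpty then none else some (q.1, sd2))
    if td2.isEmpty then none else some (p.1, td2))

-- ===== PRECONDITION & SPEC =====
def Spec_parse_ds (ds_seq : String) (schema : List (String × String)) (remove_nm : Bool) (convert_specials : Bool) (out : List (String × List (String × List (String × List String)))) : Prop := out = parse_ds_alt ds_seq schema remove_nm convert_specials
instance (ds_seq : String) (schema : List (String × String)) (remove_nm : Bool) (convert_specials : Bool) (out : List (String × List (String × List (String × List String)))) : Decidable (Spec_parse_ds ds_seq schema remove_nm convert_specials out) := by unfold Spec_parse_ds; infer_instance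

-- ===== CLAIM (what is proved, stated in full; the proofs are below) =====
def Claim_equal_parse_ds : Prop := ∀ (ds_seq : String) (schema : List (String × String)) (remove_nm : Bool) (convert_specials : Bool), Dom_parse_ds ds_seq schema remove_nm convert_specials → Spec_parse_ds ds_seq schema remove_nm convert_specials (parse_ds ds_seq schema remove_nm convert_specials)

-- ===== LEMMAS AND PROOFS =====

-- ---- 1. ds_seq.strip().split() = ds_seq.split() ----

theorem pv_go_allspace (ws : List Char) (cur : List Char) (acc : List (List Char))
    (h : ∀ c ∈ ws, PySem.Chars.isspace c = true) :
    PySem.Chars.split₀.go ws cur acc = PySem.Chars.split₀.go [] cur acc := by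
  induction ws generalizing cur acc with
  | nil => rfl
  | cons c rest ih =>
    have hc := h c (by simp)
    have hrest : ∀ c ∈ rest, PySem.Chars.isspace c = true := fun c hm => h c (by simp [hm])
    by_cases hcur : cur.isEmpty <;>
      simp [PySem.Chars.split₀.go, hc, hcur, ih _ _ hrest]

theorem pv_go_append_ws (cs ws : List Char) (cur : List Char) (acc : List (List Char))
    (h : ∀ c ∈ ws, PySem.Chars.isspace c = true) :
    PySem.Chars.split₀.go (cs ++ ws) cur acc = PySem.Chars.split₀.go cs cur acc := by
  induction cs generalizing cur acc with
  | nil => simpa using pv_go_allspace ws cur acc h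
  | cons c rest ih =>
    simp only [List.cons_append, PySem.Chars.split₀.go]
    by_cases hc : PySem.Chars.isspace c <;> by_cases hcur : cur.isEmpty <;>
      simp [hc, hcur, ih]

theorem pv_go_dropWhile (cs : List Char) (acc : List (List Char)) :
    PySem.Chars.split₀.go (List.dropWhile PySem.Chars.isspace cs) [] acc =
    PySem.Chars.split₀.go cs [] acc := by
  induction cs with
  | nil => rfl
  | cons c rest ih =>
    by_cases hc : PySem.Chars.isspace c
    · simpa [List.dropWhile, hc, PySem.Chars.split₀.go] using ih
    · simp [List.dropWhile, hc]

theorem pv_chars_split₀_strip (cs : List Char) :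
    PySem.Chars.split₀ (PySem.Chars.strip cs) = PySem.Chars.split₀ cs := by
  unfold PySem.Chars.strip PySem.Chars.rstrip PySem.Chars.lstrip
  set l := List.dropWhile PySem.Chars.isspace cs with hl
  have hdecomp : l = (List.dropWhile PySem.Chars.isspace l.reverse).reverse ++
      (List.takeWhile PySem.Chars.isspace l.reverse).reverse := by
    rw [← List.reverse_append, List.takeWhile_append_dropWhile, List.reverse_reverse]
  have hws : ∀ c ∈ (List.takeWhile PySem.Chars.isspace l.reverse).reverse,
      PySem.Chars.isspace c = true :=
    fun c hm => List.mem_takeWhile_imp (List.mem_reverse.mp hm)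
  unfold PySem.Chars.split₀
  calc PySem.Chars.split₀.go (List.dropWhile PySem.Chars.isspace l.reverse).reverse [] []
      = PySem.Chars.split₀.go l [] [] := by
        conv_rhs => rw [hdecomp]
        rw [pv_go_append_ws _ _ _ _ hws]
    _ = PySem.Chars.split₀.go cs [] [] := by rw [hl]; exact pv_go_dropWhile cs []

theorem pv_split₀_strip (s : String) :
    PySem.Str.split₀ (PySem.Str.strip s) = PySem.Str.split₀ s := by
  have hinj : Function.Injective String.toList := fun a b h => by
    have := congrArg String.ofList h; simpa using this
  apply List.map_injective_iff.mpr hinj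
  rw [PySem.Str.split₀_map_toList, PySem.Str.split₀_map_toList, PySem.Str.toList_strip]
  exact pv_chars_split₀_strip s.toList

-- ---- 2. the scan produces exactly B's segments ----

def pvRawOf (segs : List ((String × String × String) × List String)) : pvND :=
  segs.foldl bRawStep .empty

def pvInv (a : pvND × (String × String × String) × List String)
    (segs : List ((String × String × String) × List String)) : Prop :=
  (segs = [] ∧ a.1 = .empty ∧ a.2.1 = ("", "", "")) ∨
  ∃ init h vs, segs = init ++ [(h, vs)] ∧ a.1 = pvRawOf init ∧ a.2.1 = h ∧ a.2.2 = vs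

theorem pv_bSetRaw_eq (m : pvND) (d t s v : String) :
    bSetRaw m d t s v = aSetNested m d t s v := by
  show (let m1 := m.setdefault d .empty
        let td := m1.getD d .empty
        let td1 := td.setdefault t .empty
        let sd := td1.getD t .empty
        m1.insert d (td1.insert t (sd.insert s v))) = _
  simp only []
  unfold aSetNested
  by_cases hd : m.contains d = true
  · rw [PySem.Dict.setdefault_of_contains _ _ hd]
    by_cases ht : (m.getD d .empty).contains t = true
    · rw [PySem.Dict.setdefault_of_contains _ _ ht]
    · rw [PySem.Dict.setdefault_of_not_contains _ _ (Bool.eq_false_iff.mpr ht)]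
      rw [PySem.Dict.getD_insert_self, PySem.Dict.insert_insert_self,
        PySem.Dict.getD_of_not_contains _ _ (Bool.eq_false_iff.mpr ht)]
  · rw [PySem.Dict.setdefault_of_not_contains _ _ (Bool.eq_false_iff.mpr hd),
      PySem.Dict.getD_insert_self, PySem.Dict.insert_insert_self,
      PySem.Dict.getD_of_not_contains _ _ (Bool.eq_false_iff.mpr hd),
      PySem.Dict.setdefault_of_not_contains _ _ (PySem.Dict.contains_empty t),
      PySem.Dict.getD_insert_self, PySem.Dict.insert_insert_self,
      PySem.Dict.getD_empty]

theorem pv_bHeader_eq : bHeader = aHeaderTriple := rfl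

theorem pv_aStep_id (t : String) (h1 : bKeep t = false) (st : pvND × (String × String × String) × List String) :
    aStep st t = st := by
  obtain ⟨m, cur, vals⟩ := st
  unfold bKeep at h1
  unfold aStep
  cases htag : (t == "<ds/>" || t == "</ds>") with
  | true => simp only [if_true]
  | false =>
    simp only [htag, Bool.false_eq_true, if_false] at h1 ⊢
    cases hbr : ((PySem.Str.pyGet? t 0 == some '<') && (PySem.Str.pyGet? t (-1) == some '>')) with
    | false =>
      simp only [hbr, Bool.false_eq_true, if_false] at h1
      exact absurd h1 (by simp)
    | true =>
      have hbr' : aIsBracket t = true := hbr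
      simp only [hbr, if_true] at h1
      rw [Bool.or_eq_false_iff] at h1
      obtain ⟨h1a, hdc⟩ := h1
      rw [Bool.or_eq_false_iff] at h1a
      obtain ⟨hcnt, hnm⟩ := h1a
      simp only [hbr', hcnt, hnm, hdc, Bool.or_self, Bool.false_eq_true,
        if_false, if_true]

theorem pv_aStep_append (t : String) (h1 : bKeep t = true) (h2 : bIsHeader t = false)
    (m : pvND) (cur : String × String × String) (vals : List String) :
    aStep (m, cur, vals) t = (m, cur, vals ++ [t]) := by
  unfold bKeep at h1
  unfold bIsHeader at h2
  unfold aStep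
  cases htag : (t == "<ds/>" || t == "</ds>") with
  | true => rw [htag] at h1; simp at h1
  | false =>
    simp only [htag, Bool.false_eq_true, if_false] at h1 ⊢
    cases hbr : ((PySem.Str.pyGet? t 0 == some '<') && (PySem.Str.pyGet? t (-1) == some '>')) with
    | false =>
      have hbr' : aIsBracket t = false := hbr
      simp only [hbr', Bool.false_eq_true, if_false]
    | true =>
      have hbr' : aIsBracket t = true := hbr
      simp only [hbr, if_true] at h1
      have hcnt : (PySem.Str.count t "-" == 2) = false := by
        cases hc : (PySem.Str.count t "-" == 2)
        · rfl
        · exfalso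
          rw [Bool.eq_false_iff] at h2
          exact h2 (by rw [Bool.and_eq_true]; exact ⟨hbr, hc⟩)
      rw [hcnt, Bool.false_or] at h1
      simp only [hbr', hcnt, h1, Bool.false_eq_true, if_false, if_true]

theorem pv_aStep_header (t : String) (h2 : bIsHeader t = true)
    (m : pvND) (cur : String × String × String) (vals : List String) :
    aStep (m, cur, vals) t =
      (if (cur.1 != "") && (cur.2.1 != "") && (cur.2.2 != "") && !vals.isEmpty then
         aSetNested m cur.1 cur.2.1 cur.2.2 (PySem.Str.join " " vals)
       else m, aHeaderTriple t, []) := by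
  unfold bIsHeader at h2
  rw [Bool.and_eq_true] at h2
  obtain ⟨hbr, hcnt⟩ := h2
  have hbr' : aIsBracket t = true := hbr
  have h1 : (t == "<ds/>") = false := by
    cases he : (t == "<ds/>")
    · rfl
    · exfalso
      rw [beq_iff_eq] at he
      subst he
      rw [show PySem.Str.count "<ds/>" "-" = 0 from rfl] at hcnt
      simp at hcnt
  have h1' : (t == "</ds>") = false := by
    cases he : (t == "</ds>")
    · rfl
    · exfalso
      rw [beq_iff_eq] at he
      subst he
      rw [show PySem.Str.count "</ds>" "-" = 0 from rfl] at hcnt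
      simp at hcnt
  unfold aStep
  simp only [h1, h1', Bool.or_self, Bool.false_eq_true, if_false, hbr', hcnt, if_true]

theorem pv_bRawStep_eq (m : pvND) (h : String × String × String) (vs : List String) :
    bRawStep m (h, vs) =
      if (h.1 != "") && (h.2.1 != "") && (h.2.2 != "") && !vs.isEmpty then
        aSetNested m h.1 h.2.1 h.2.2 (PySem.Str.join " " vs)
      else m := by
  unfold bRawStep
  dsimp only
  rw [pv_bSetRaw_eq]

theorem pv_inv_step (t : String) (h1 : bKeep t = true)
    (a : pvND × (String × String × String) × List String)
    (segs : List ((String × String × String) × List String))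
    (hinv : pvInv a segs) : pvInv (aStep a t) (bSegStep segs t) := by
  obtain ⟨m, cur, vals⟩ := a
  have hinv' : (m = .empty ∧ cur = ("", "", "") → pvInv (m, cur, vals) segs) := fun _ => hinv
  cases hhd : bIsHeader t with
  | false =>
    rw [pv_aStep_append t h1 hhd]
    unfold bSegStep
    rw [hhd]
    rcases hinv with ⟨hseg, hm, hcur⟩ | ⟨init, h, vs, hseg, hm, hcur, hvals⟩
    · subst hseg
      simp only [Bool.false_eq_true, if_false, List.getLast?_nil]
      exact Or.inl ⟨rfl, hm, hcur⟩
    · subst hseg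
      simp only [Bool.false_eq_true, if_false, List.getLast?_concat, List.dropLast_concat]
      dsimp only at hvals ⊢
      refine Or.inr ⟨init, h, vs ++ [t], rfl, hm, hcur, ?_⟩
      rw [hvals]
  | true =>
    rw [pv_aStep_header t hhd]
    unfold bSegStep
    rw [hhd]
    simp only [if_true]
    rcases hinv with ⟨hseg, hm, hcur⟩ | ⟨init, h, vs, hseg, hm, hcur, hvals⟩
    · subst hseg
      dsimp only at hm hcur
      refine Or.inr ⟨[], bHeader t, [], rfl, ?_, ?_, rfl⟩
      · rw [hcur]
        simp only [bne_self_eq_false, Bool.false_and, Bool.false_eq_true, if_false]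
        exact hm
      · simp [pv_bHeader_eq]
    · subst hseg
      dsimp only at hm hcur hvals
      refine Or.inr ⟨init ++ [(h, vs)], bHeader t, [], rfl, ?_, by simp [pv_bHeader_eq], rfl⟩
      simp only [pvRawOf, List.foldl_append, List.foldl_cons, List.foldl_nil]
      rw [hcur, hvals, hm]
      unfold pvRawOf
      rw [pv_bRawStep_eq]
  
theorem pv_scan_inv (L : List String) :
    ∀ (a : pvND × (String × String × String) × List String)
      (segs : List ((String × String × String) × List String)),
    (∀ t ∈ L, bKeep t = true) → pvInv a segs →
    pvInv (L.foldl aStep a) (L.foldl bSegStep segs) := by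
  induction L with
  | nil => intro a segs _ hinv; exact hinv
  | cons t L ih =>
    intro a segs hall hinv
    exact ih _ _ (fun x hx => hall x (by simp [hx]))
      (pv_inv_step t (hall t (by simp)) a segs hinv)

theorem pv_foldl_aStep_filter (toks : List String)
    (a : pvND × (String × String × String) × List String) :
    toks.foldl aStep a = (toks.filter bKeep).foldl aStep a := by
  induction toks generalizing a with
  | nil => rfl
  | cons t toks ih =>
    cases hk : bKeep t
    · simp only [List.foldl_cons, List.filter_cons, hk, Bool.false_eq_true, if_false]
      rw [pv_aStep_id t hk a]
      exact ih a
    · simp only [List.foldl_cons, List.filter_cons, hk, if_true]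
      exact ih _

theorem pv_final_flush (a : pvND × (String × String × String) × List String)
    (segs : List ((String × String × String) × List String)) (hinv : pvInv a segs) :
    (if (a.2.1.1 != "") && (a.2.1.2.1 != "") && (a.2.1.2.2 != "") && !a.2.2.isEmpty then
       aSetNested a.1 a.2.1.1 a.2.1.2.1 a.2.1.2.2 (PySem.Str.join " " a.2.2)
     else a.1) = pvRawOf segs := by
  rcases hinv with ⟨hseg, hm, hcur⟩ | ⟨init, h, vs, hseg, hm, hcur, hvals⟩
  · subst hseg
    rw [hcur]
    simp only [bne_self_eq_false, Bool.false_and, Bool.false_eq_true, if_false]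
    exact hm
  · subst hseg
    simp only [pvRawOf, List.foldl_append, List.foldl_cons, List.foldl_nil]
    simp only [pvRawOf] at hm
    rw [hcur, hvals, hm]
    rw [pv_bRawStep_eq]

-- ---- 3. nodup keys at the three levels of the raw dict ----

def pvNDnodup (m : pvND) : Prop :=
  m.keys.Nodup ∧ ∀ d, (m.getD d .empty).keys.Nodup ∧
    ∀ t, ((m.getD d .empty).getD t .empty).keys.Nodup

theorem pv_nodup_set (m : pvND) (d t s v : String) (h : pvNDnodup m) :
    pvNDnodup (aSetNested m d t s v) := by
  obtain ⟨h1, h2⟩ := h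
  unfold aSetNested
  refine ⟨PySem.Dict.nodup_keys_insert _ _ _ h1, ?_⟩
  intro d'
  rw [PySem.Dict.getD_insert]
  by_cases hd : d' = d
  · simp only [hd, if_true]
    constructor
    · exact PySem.Dict.nodup_keys_insert _ _ _ (h2 d).1
    · intro t'
      rw [PySem.Dict.getD_insert]
      by_cases ht : t' = t
      · simp only [ht, if_true]
        exact PySem.Dict.nodup_keys_insert _ _ _ ((h2 d).2 t)
      · simp only [ht, if_false]
        exact (h2 d).2 t'
  · simp only [hd, if_false]
    exact h2 d'

theorem pv_nodup_empty : pvNDnodup .empty := by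
  refine ⟨by simp [PySem.Dict.keys_empty], ?_⟩
  intro d
  rw [PySem.Dict.getD_empty]
  exact ⟨by simp [PySem.Dict.keys_empty], fun t => by
    rw [PySem.Dict.getD_empty]; simp [PySem.Dict.keys_empty]⟩

theorem pv_nodup_rawOf (segs : List ((String × String × String) × List String)) :
    pvNDnodup (pvRawOf segs) := by
  suffices h : ∀ m, pvNDnodup m → pvNDnodup (segs.foldl bRawStep m) from
    h _ pv_nodup_empty
  induction segs with
  | nil => intro m hm; exact hm
  | cons seg segs ih =>
    intro m hm
    refine ih _ ?_
    unfold bRawStep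
    split
    · rw [pv_bSetRaw_eq]; exact pv_nodup_set _ _ _ _ _ hm
    · exact hm

-- ---- 4. the transforming loop vs the comprehensions ----

def pvIns (cv : Bool) (t : String) (acc : Option pvTDo) (sv : String × String) : Option pvTDo :=
  some ((acc.getD .empty).insert t
    (((acc.getD .empty).getD t .empty).insert sv.1 [aConv cv sv.2]))

def pvG3 (rm cv : Bool) (t : String) (acc : Option pvTDo) (sv : String × String) : Option pvTDo :=
  if rm && sv.2 == "<nm>" then acc else pvIns cv t acc sv

def pvApp (o : pvNDo) (d : String) : Option pvTDo → pvNDo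
  | none => o
  | some td => o.insert d td

def pvTau (rm cv : Bool) (m : pvND) (d : String) : Option pvTDo :=
  ((m.getD d .empty).keys).foldl
    (fun acc st => (((m.getD d .empty).getD st .empty).items).foldl (pvG3 rm cv st) acc) none

theorem pv_setO_app (rm cv : Bool) (d t : String) (o : pvNDo) (hd : o.contains d = false)
    (acc : Option pvTDo) (sv : String × String) :
    aSetO (pvApp o d acc) d t sv.1 [aConv cv sv.2] = pvApp o d (pvIns cv t acc sv) := by
  cases acc with
  | none =>
    simp only [pvApp, pvIns, aSetO, Option.getD_none]
    rw [PySem.Dict.getD_of_not_contains _ _ hd]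
  | some td =>
    simp only [pvApp, pvIns, aSetO, Option.getD_some]
    rw [PySem.Dict.getD_insert_self, PySem.Dict.insert_insert_self]

theorem pv_L3 (rm cv : Bool) (d t : String) (L : List (String × String)) (o : pvNDo)
    (hd : o.contains d = false) :
    ∀ acc, L.foldl (fun o' sv => if rm && sv.2 == "<nm>" then o'
        else aSetO o' d t sv.1 [aConv cv sv.2]) (pvApp o d acc)
      = pvApp o d (L.foldl (pvG3 rm cv t) acc) := by
  induction L with
  | nil => intro acc; rfl
  | cons sv L ih =>
    intro acc
    simp only [List.foldl_cons]
    by_cases hskip : (rm && sv.2 == "<nm>") = true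
    · rw [if_pos hskip]
      have : pvG3 rm cv t acc sv = acc := by unfold pvG3; rw [if_pos hskip]
      rw [this]
      exact ih acc
    · rw [if_neg hskip]
      have : pvG3 rm cv t acc sv = pvIns cv t acc sv := by unfold pvG3; rw [if_neg hskip]
      rw [this, pv_setO_app rm cv d t o hd acc sv]
      exact ih _

theorem pv_L2 (rm cv : Bool) (d : String) (K : String → List (String × String)) (o : pvNDo)
    (hd : o.contains d = false) :
    ∀ (sts : List String) (acc : Option pvTDo),
    sts.foldl (fun o' st => (K st).foldl (fun o'' sv => if rm && sv.2 == "<nm>" then o''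
        else aSetO o'' d st sv.1 [aConv cv sv.2]) o') (pvApp o d acc)
      = pvApp o d (sts.foldl (fun acc st => (K st).foldl (pvG3 rm cv st) acc) acc) := by
  intro sts
  induction sts with
  | nil => intro acc; rfl
  | cons st sts ih =>
    intro acc
    simp only [List.foldl_cons]
    rw [pv_L3 rm cv d st (K st) o hd acc]
    exact ih _

theorem pv_L1 (rm cv : Bool) (m : pvND) :
    ∀ (doms : List String) (o : pvNDo), doms.Nodup →
    (∀ d ∈ doms, o.contains d = false) →
    (doms.foldl (fun o dom =>
      (m.getD dom .empty).keys.foldl (fun o slot_type =>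
        ((m.getD dom .empty).getD slot_type .empty).items.foldl (fun o sv =>
          if rm && sv.2 == "<nm>" then o
          else aSetO o dom slot_type sv.1 [aConv cv sv.2]) o) o) o).items
      = o.items ++ doms.filterMap (fun d => (pvTau rm cv m d).map (fun td => (d, td))) := by
  intro doms
  induction doms with
  | nil => intro o _ _; simp
  | cons d doms ih =>
    intro o hnd hfresh
    simp only [List.foldl_cons, List.filterMap_cons]
    have hd : o.contains d = false := hfresh d (by simp)
    have hstep : (m.getD d .empty).keys.foldl (fun o slot_type =>
        ((m.getD d .empty).getD slot_type .empty).items.foldl (fun o sv =>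
          if rm && sv.2 == "<nm>" then o
          else aSetO o d slot_type sv.1 [aConv cv sv.2]) o) o
        = pvApp o d (pvTau rm cv m d) := by
      have := pv_L2 rm cv d (fun st => ((m.getD d .empty).getD st .empty).items) o hd
        ((m.getD d .empty).keys) none
      simpa [pvApp, pvTau] using this
    rw [hstep]
    have hfresh' : ∀ d' ∈ doms, (pvApp o d (pvTau rm cv m d)).contains d' = false := by
      intro d' hd'
      have hne : d' ≠ d := by
        rintro rfl; exact (List.nodup_cons.mp hnd).1 hd'
      cases htau : pvTau rm cv m d with
      | none => simpa [pvApp] using hfresh d' (by simp [hd'])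
      | some td =>
        simp only [pvApp]
        rw [PySem.Dict.contains_insert]
        simp [hne, hfresh d' (by simp [hd'])]
    rw [ih _ (List.nodup_cons.mp hnd).2 hfresh']
    cases htau : pvTau rm cv m d with
    | none => simp [pvApp]
    | some td =>
      simp only [pvApp, Option.map_some]
      rw [PySem.Dict.items_insert_of_not_contains _ _ hd]
      simp

theorem pv_ins_localize (cv : Bool) (t : String) (K : List (String × String)) :
    ∀ (td0 : pvTDo) (sd0 : pvSDo),
    K.foldl (pvIns cv t) (some (td0.insert t sd0)) =
      some (td0.insert t (K.foldl (fun sd sv => sd.insert sv.1 [aConv cv sv.2]) sd0)) := by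
  induction K with
  | nil => intro td0 sd0; rfl
  | cons sv K ih =>
    intro td0 sd0
    simp only [List.foldl_cons]
    have : pvIns cv t (some (td0.insert t sd0)) sv =
        some (td0.insert t (sd0.insert sv.1 [aConv cv sv.2])) := by
      simp only [pvIns, Option.getD_some]
      rw [PySem.Dict.getD_insert_self, PySem.Dict.insert_insert_self]
    rw [this]
    exact ih td0 _

theorem pv_g3_filter (rm cv : Bool) (t : String) (K : List (String × String))
    (acc : Option pvTDo) :
    K.foldl (pvG3 rm cv t) acc =
      (K.filter (fun sv => !(rm && sv.2 == "<nm>"))).foldl (pvIns cv t) acc := by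
  have hfun : (fun (x : Option pvTDo) (a : String × String) =>
      if (!(rm && a.2 == "<nm>")) = true then pvIns cv t x a else x) = pvG3 rm cv t := by
    funext x a
    by_cases h : (rm && a.2 == "<nm>") = true <;> simp [pvG3, h]
  rw [List.foldl_filter, hfun]

theorem pv_g3_run (rm cv : Bool) (t : String) (K : List (String × String))
    (acc : Option pvTDo) (hfresh : (acc.getD .empty).contains t = false)
    (hnd : (K.map Prod.fst).Nodup) :
    (K.filter (fun sv => !(rm && sv.2 == "<nm>")) = [] ∧ K.foldl (pvG3 rm cv t) acc = acc) ∨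
    (K.filter (fun sv => !(rm && sv.2 == "<nm>")) ≠ [] ∧ ∃ sd : pvSDo,
      K.foldl (pvG3 rm cv t) acc = some ((acc.getD .empty).insert t sd) ∧
      sd.items = (K.filter (fun sv => !(rm && sv.2 == "<nm>"))).map
        (fun sv => (sv.1, [aConv cv sv.2]))) := by
  rw [pv_g3_filter]
  cases hK : K.filter (fun sv => !(rm && sv.2 == "<nm>")) with
  | nil => exact Or.inl ⟨rfl, rfl⟩
  | cons k0 K' =>
    refine Or.inr ⟨by simp, ?_⟩
    have hnd' : ((k0 :: K').map Prod.fst).Nodup := by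
      have hsub : (K.filter (fun sv => !(rm && sv.2 == "<nm>"))).Sublist K :=
        List.filter_sublist
      have := (hsub.map Prod.fst).nodup hnd
      rwa [hK] at this
    simp only [List.map_cons, List.nodup_cons] at hnd'
    obtain ⟨hk0, hndK'⟩ := hnd'
    simp only [List.foldl_cons]
    have hfirst : pvIns cv t acc k0 =
        some ((acc.getD .empty).insert t ((PySem.Dict.empty).insert k0.1 [aConv cv k0.2])) := by
      simp only [pvIns]
      rw [PySem.Dict.getD_of_not_contains _ _ hfresh]
    rw [hfirst, pv_ins_localize]
    refine ⟨_, rfl, ?_⟩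
    rw [PySem.Dict.items_foldl_insert_fresh K' Prod.fst (fun sv => [aConv cv sv.2]) _ ?_ hndK']
    · rw [PySem.Dict.items_insert_of_not_contains _ _ (PySem.Dict.contains_empty _)]
      rw [show (PySem.Dict.empty : pvSDo).items = [] from rfl]
      simp
    · intro sv hsv
      rw [PySem.Dict.contains_insert]
      have : sv.1 ≠ k0.1 := by
        intro he
        exact hk0 (he ▸ List.mem_map_of_mem hsv)
      simp [this, PySem.Dict.contains_empty]

-- B's inner comprehension, rephrased over keys
def pvBp (rm cv : Bool) (td : pvTD) (st : String) : Option (String × List (String × List String)) :=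
  if (bPrune rm cv (td.getD st .empty)).isEmpty then none
  else some (st, bPrune rm cv (td.getD st .empty))

def pvMidRel (acc : Option pvTDo) (l : List (String × List (String × List String))) : Prop :=
  (acc = none ∧ l = []) ∨
  ∃ tda, acc = some tda ∧ tda.items.map (fun q => (q.1, q.2.items)) = l ∧ l ≠ []

theorem pv_bFix_eq (cv : Bool) (v : String) : bFix cv v = aConv cv v := by
  unfold bFix aConv
  by_cases hcv : cv
  · simp only [hcv, if_true]
    by_cases h1 : v = "<nm>"
    · subst h1; rfl
    · by_cases h2 : v = "<dc>"
      · subst h2; rfl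
      · rw [show (PySem.Dict.ofList [("<nm>", "not mentioned"), ("<dc>", "dontcare")] :
            PySem.Dict String String) =
            PySem.Dict.mk [("<nm>", "not mentioned"), ("<dc>", "dontcare")] from rfl]
        rw [PySem.Dict.getD_eq_get?_getD, PySem.Dict.get?_mk_cons,
          if_neg (by simp [beq_iff_eq]; exact fun h => h1 h.symm),
          PySem.Dict.get?_mk_cons,
          if_neg (by simp [beq_iff_eq]; exact fun h => h2 h.symm)]
        have hnone : (PySem.Dict.mk ([] : List (String × String))).get? v = none := rfl
        simp [beq_iff_eq, h1, h2, hnone]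
  · simp [hcv]

theorem pv_bp_fst (rm cv : Bool) (td : pvTD) (P : List String) (x : String)
    (hx : x ∈ (P.filterMap (pvBp rm cv td)).map Prod.fst) : x ∈ P := by
  simp only [List.mem_map, List.mem_filterMap] at hx
  obtain ⟨q, ⟨st, hst, hbp⟩, hfst⟩ := hx
  unfold pvBp at hbp
  split at hbp
  · exact absurd hbp (by simp)
  · cases hbp
    subst hfst
    exact hst

theorem pv_mid (rm cv : Bool) (td : pvTD)
    (hinner : ∀ t, (td.getD t .empty).keys.Nodup) :
    ∀ P : List String, P.Nodup →
    pvMidRel (P.foldl (fun acc st => ((td.getD st .empty).items).foldl (pvG3 rm cv st) acc) none)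
      (P.filterMap (pvBp rm cv td)) := by
  intro P
  induction P using List.reverseRecOn with
  | nil => intro _; exact Or.inl ⟨rfl, rfl⟩
  | append_singleton P' st ih =>
    intro hnd
    have hndP' : P'.Nodup := (List.nodup_append.mp hnd).1
    have hstP' : st ∉ P' := by
      have hdis := (List.nodup_append.mp hnd).2.2
      intro hmem
      exact hdis st hmem st (by simp) rfl
    have hrel := ih hndP'
    rw [List.foldl_append, List.filterMap_append]
    simp only [List.foldl_cons, List.foldl_nil, List.filterMap_cons, List.filterMap_nil]
    set acc := P'.foldl (fun acc st => ((td.getD st .empty).items).foldl (pvG3 rm cv st) acc) none with hacc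
    set l := P'.filterMap (pvBp rm cv td) with hl
    have hfresh : (acc.getD .empty).contains st = false := by
      rcases hrel with ⟨hn, _⟩ | ⟨tda, hs, hitems, _⟩
      · rw [hn]; exact PySem.Dict.contains_empty st
      · rw [hs]
        simp only [Option.getD_some]
        cases hc : tda.contains st
        · rfl
        · exfalso
          have hmem := (PySem.Dict.contains_iff_mem_keys tda st).mp hc
          have hkeys : tda.keys = l.map Prod.fst := by
            have : tda.items.map Prod.fst = (tda.items.map (fun q => (q.1, q.2.items))).map Prod.fst := by
              simp [Function.comp]
            rw [hitems] at this
            simpa [PySem.Dict.keys] using this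
          rw [hkeys] at hmem
          exact hstP' (pv_bp_fst rm cv td P' st (hl ▸ hmem))
    have hndK : (((td.getD st .empty).items).map Prod.fst).Nodup := by
      have := hinner st
      simpa [PySem.Dict.keys] using this
    have hprune : bPrune rm cv (td.getD st .empty) =
        (((td.getD st .empty).items).filter (fun sv => !(rm && sv.2 == "<nm>"))).map
          (fun sv => (sv.1, [aConv cv sv.2])) := by
      unfold bPrune
      congr 1
      funext sv
      rw [pv_bFix_eq]
    rcases pv_g3_run rm cv st ((td.getD st .empty).items) acc hfresh hndK with
      ⟨hkept, hrun⟩ | ⟨hkept, sd, hrun, hsd⟩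
    · rw [hrun]
      have hbp : pvBp rm cv td st = none := by
        unfold pvBp
        rw [hprune, hkept]
        rfl
      rw [hbp]
      simpa using hrel
    · rw [hrun]
      have hsd2 : bPrune rm cv (td.getD st .empty) = sd.items := by rw [hprune, hsd]
      have hbp : pvBp rm cv td st = some (st, sd.items) := by
        unfold pvBp
        rw [hsd2]
        rw [if_neg (by rw [hsd]; simpa using hkept)]
      rw [hbp]
      rcases hrel with ⟨hn, hle⟩ | ⟨tda, hs, hitems, hlne⟩
      · rw [hn, hle]
        refine Or.inr ⟨_, rfl, ?_, by simp⟩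
        simp only [Option.getD_none]
        rw [PySem.Dict.items_insert_of_not_contains _ _ (PySem.Dict.contains_empty st)]
        rw [show (PySem.Dict.empty : pvTDo).items = [] from rfl]
        simp
      · rw [hs]
        simp only [Option.getD_some]
        have hcontains : tda.contains st = false := by
          have := hfresh
          rw [hs] at this
          simpa using this
        refine Or.inr ⟨_, rfl, ?_, by simp⟩
        rw [PySem.Dict.items_insert_of_not_contains _ _ hcontains]
        rw [List.map_append, hitems]
        simp

theorem pv_transform_eq (rm cv : Bool) (m : pvND) (hnd : pvNDnodup m) :
    (aTransform rm cv m).items.map (fun p => (p.1, p.2.items.map (fun q => (q.1, q.2.items)))) =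
    m.items.filterMap (fun p =>
      let td2 := p.2.items.filterMap (fun q =>
        let sd2 := bPrune rm cv q.2
        if sd2.isEmpty then none else some (q.1, sd2))
      if td2.isEmpty then none else some (p.1, td2)) := by
  obtain ⟨h1, h2⟩ := hnd
  unfold aTransform
  rw [pv_L1 rm cv m m.keys .empty h1 (fun d _ => PySem.Dict.contains_empty d)]
  have hempty : (PySem.Dict.empty : pvNDo).items = [] := rfl
  rw [hempty, List.nil_append, List.map_filterMap]
  conv_rhs => rw [PySem.Dict.items_eq_map_keys m h1 .empty, List.filterMap_map]
  apply List.filterMap_congr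
  intro d _
  simp only [Function.comp]
  -- relate the B inner filterMap over items to pvBp over keys
  have hinner_eq : (m.getD d .empty).items.filterMap (fun q =>
      let sd2 := bPrune rm cv q.2
      if sd2.isEmpty then none else some (q.1, sd2)) =
      (m.getD d .empty).keys.filterMap (pvBp rm cv (m.getD d .empty)) := by
    conv_lhs => rw [PySem.Dict.items_eq_map_keys (m.getD d .empty) (h2 d).1 .empty,
      List.filterMap_map]
    rfl
  rw [hinner_eq]
  have hmid := pv_mid rm cv (m.getD d .empty) ((h2 d).2) (m.getD d .empty).keys (h2 d).1
  rcases hmid with ⟨hn, hle⟩ | ⟨tda, hs, hitems, hlne⟩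
  · unfold pvTau
    rw [hn, hle]
    simp
  · unfold pvTau
    rw [hs, hitems.symm]
    simp only [Option.map_some]
    rw [if_neg (by simpa using fun h => hlne (hitems.symm.trans (by rw [h]; simp)))]


-- ===== VERDICT (by name: the statement is the Claim_ definition above) =====
theorem parse_ds_spec : Claim_equal_parse_ds := by
  intro ds_seq schema rm cv _
  unfold Spec_parse_ds parse_ds parse_ds_alt
  rw [pv_split₀_strip]
  rw [pv_foldl_aStep_filter]
  have hinv := pv_scan_inv ((PySem.Str.split₀ ds_seq).filter bKeep)
    (.empty, ("", "", ""), []) [] (fun t ht => (List.mem_filter.mp ht).2)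
    (Or.inl ⟨rfl, rfl, rfl⟩)
  rcases ha : ((PySem.Str.split₀ ds_seq).filter bKeep).foldl aStep
      (.empty, ("", "", ""), []) with ⟨m, cur, vals⟩
  rw [ha] at hinv
  dsimp only
  have hflush := pv_final_flush (m, cur, vals) _ hinv
  dsimp only at hflush
  rw [hflush]
  exact pv_transform_eq rm cv _ (pv_nodup_rawOf _)
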